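-- pv_equiv track=rewrite | github.com/osuyuanqi/job-prep | LeetCode/day13.py | inproperty_action
-- ===== SOURCE A (Python) =====
-- def inproperty_action(badge_records):
--     #     collection of inproper action
--     in_exit,in_enter = [],[]
--
--     #unpackage the input: badge_records
--     my_dict = {}
--     for i in badge_records:
--         name, action = i
--         if name not in my_dict:
--             if action == "exit":
--                 in_exit.append(name)
--             my_dict[name] = action
--         else:
--             if action != my_dict[name]:
--                 if action == "enter" and my_dict[name] == "exit":
--                     in_enter.append(name)
--                 my_dict[name] = action
--     return set(in_exit),set(in_enter)
-- ===== SOURCE B (Python) =====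
-- def inproperty_action(badge_records):
--     # Pass 1: first recorded action of each name (insertion order kept).
--     first = {}
--     for name, action in badge_records:
--         first.setdefault(name, action)
--     in_exit = {name for name, action in first.items() if action == "exit"}
--     # Pass 2: last recorded action of each name, flagging exit->enter transitions.
--     last = {}
--     in_enter = set()
--     for name, action in badge_records:
--         if last.get(name) == "exit" and action == "enter":
--             in_enter.add(name)
--         last[name] = action
--     return in_exit, in_enter
-- ===== Notes on version B (the rewrite author's own statement) =====
-- stated objective: simpler
-- what changed: Replaces A's single fused state machine (one dict of collapsed last actions with nested not-in/changed branches feeding both lists) by two independent single-purpose passes: a first-action dict filtered for 'exit', and a last-action dict with unconditional updates flagging direct exit->enter transitions into a set.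
import Mathlib
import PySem

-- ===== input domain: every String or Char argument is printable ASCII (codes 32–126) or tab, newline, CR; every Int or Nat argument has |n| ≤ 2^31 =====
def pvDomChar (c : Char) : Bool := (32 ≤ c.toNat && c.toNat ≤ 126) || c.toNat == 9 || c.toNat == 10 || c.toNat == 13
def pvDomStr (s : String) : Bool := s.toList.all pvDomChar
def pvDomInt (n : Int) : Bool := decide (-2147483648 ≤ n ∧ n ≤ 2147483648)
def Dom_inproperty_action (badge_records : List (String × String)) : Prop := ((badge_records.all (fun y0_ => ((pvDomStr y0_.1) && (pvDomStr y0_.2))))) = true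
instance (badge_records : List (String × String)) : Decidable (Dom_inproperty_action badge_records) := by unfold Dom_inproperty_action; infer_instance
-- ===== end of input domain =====

-- B replaces A's fused one-pass state machine by two independent single-purpose passes (simpler decomposition; same cost).

-- ===== PORT A =====
-- one loop iteration of A: state = (in_exit, in_enter, my_dict)
def stepA (st : List String × List String × PySem.Dict String String) (i : String × String) :
    List String × List String × PySem.Dict String String :=
  let name := i.1
  let action := i.2
  if st.2.2.contains name = false then
    ((if action == "exit" then st.1 ++ [name] else st.1), st.2.1, st.2.2.insert name action)
  else
    -- my_dict[name]: key is present here, so getD with a dummy default is exact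
    if action != st.2.2.getD name "" then
      (st.1,
       (if action == "enter" && st.2.2.getD name "" == "exit" then st.2.1 ++ [name] else st.2.1),
       st.2.2.insert name action)
    else st

def inproperty_action (badge_records : List (String × String)) : List String × List String :=
  let st := badge_records.foldl stepA ([], [], PySem.Dict.empty)
  (PySem.Set.ofList st.1, PySem.Set.ofList st.2.1)

-- ===== PORT B =====
-- pass 2 iteration of B: state = (last, in_enter)
def stepB (st : PySem.Dict String String × PySem.Set String) (i : String × String) :
    PySem.Dict String String × PySem.Set String :=
  (st.1.insert i.1 i.2,
   if st.1.get? i.1 == some "exit" && i.2 == "enter" then PySem.Set.add st.2 i.1 else st.2)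

def inproperty_action_alt (badge_records : List (String × String)) : List String × List String :=
  let first := badge_records.foldl (fun f i => f.setdefault i.1 i.2) PySem.Dict.empty
  let in_exit := first.items.foldl
    (fun s p => if p.2 == "exit" then PySem.Set.add s p.1 else s) PySem.Set.empty
  let st := badge_records.foldl stepB (PySem.Dict.empty, PySem.Set.empty)
  (in_exit, st.2)

-- ===== PRECONDITION & SPEC =====
def Spec_inproperty_action (badge_records : List (String × String)) (out : List String × List String) : Prop := out = inproperty_action_alt badge_records
instance (badge_records : List (String × String)) (out : List String × List String) : Decidable (Spec_inproperty_action badge_records out) := by unfold Spec_inproperty_action; infer_instance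

-- ===== CLAIM (what is proved, stated in full; the proofs are below) =====
def Claim_equal_inproperty_action : Prop := ∀ (badge_records : List (String × String)), Dom_inproperty_action badge_records → Spec_inproperty_action badge_records (inproperty_action badge_records)

-- ===== LEMMAS AND PROOFS =====

-- the set-comprehension fold equals folding Set.add over the filtered key list
lemma foldIf_eq (l : List (String × String)) (s : PySem.Set String) :
    l.foldl (fun s p => if p.2 == "exit" then PySem.Set.add s p.1 else s) s
      = ((l.filter (fun p => p.2 == "exit")).map Prod.fst).foldl PySem.Set.add s := by
  induction l generalizing s with
  | nil => rfl
  | cons p t ih =>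
      cases hb : (p.2 == "exit") <;>
        simp only [List.foldl_cons, List.filter_cons, hb, if_true,
          List.map_cons] <;> exact ih _

lemma ofList_append_singleton (xs : List String) (x : String) :
    PySem.Set.ofList (xs ++ [x]) = PySem.Set.add (PySem.Set.ofList xs) x := by
  simp [PySem.Set.ofList_eq_foldl, List.foldl_append]

lemma main_inv (bs : List (String × String)) :
    ∀ (exA enA : List String) (dA dB f : PySem.Dict String String),
    f.keys = dA.keys →
    (∀ k, dA.get? k = dB.get? k) →
    exA = ((f.items.filter (fun p => p.2 == "exit")).map Prod.fst) →
    (bs.foldl stepA (exA, enA, dA)).1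
        = (((bs.foldl (fun f i => f.setdefault i.1 i.2) f).items.filter
            (fun p => p.2 == "exit")).map Prod.fst) ∧
    PySem.Set.ofList (bs.foldl stepA (exA, enA, dA)).2.1
        = (bs.foldl stepB (dB, PySem.Set.ofList enA)).2 := by
  induction bs with
  | nil =>
      intro exA enA dA dB f hk hg hex
      exact ⟨hex, rfl⟩
  | cons i t ih =>
      intro exA enA dA dB f hk hg hex
      simp only [List.foldl_cons]
      cases hc : dA.contains i.1 with
      | false =>
          have hgnone : dA.get? i.1 = none := by
            exact (PySem.Dict.get?_eq_none_iff_contains dA i.1).mpr hc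
          have hfc : f.contains i.1 = false := by
            rw [PySem.Dict.contains_eq_decide_mem_keys, hk,
              ← PySem.Dict.contains_eq_decide_mem_keys]; exact hc
          have hAstep : stepA (exA, enA, dA) i
              = ((if i.2 == "exit" then exA ++ [i.1] else exA), enA, dA.insert i.1 i.2) := by
            simp [stepA, hc]
          have hdBnone : dB.get? i.1 = none := by rw [← hg]; exact hgnone
          have hBstep : stepB (dB, PySem.Set.ofList enA) i
              = (dB.insert i.1 i.2, PySem.Set.ofList enA) := by
            simp [stepB, hdBnone]
          rw [hAstep, hBstep, PySem.Dict.setdefault_of_not_contains f i.2 hfc]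
          apply ih
          · rw [PySem.Dict.keys_insert_of_not_contains f i.2 hfc,
              PySem.Dict.keys_insert_of_not_contains dA i.2 hc, hk]
          · intro k
            rw [PySem.Dict.get?_insert, PySem.Dict.get?_insert]
            split_ifs with hkk
            · rfl
            · exact hg k
          · rw [PySem.Dict.items_insert_of_not_contains f i.2 hfc]
            cases hb : (i.2 == "exit") <;>
              simp [List.filter_append, hb, hex]
      | true =>
          have hfct : f.contains i.1 = true := by
            rw [PySem.Dict.contains_eq_decide_mem_keys, hk,
              ← PySem.Dict.contains_eq_decide_mem_keys]; exact hc
          obtain ⟨v, hv⟩ : ∃ v, dA.get? i.1 = some v := by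
            have h := PySem.Dict.contains_eq_isSome_get? dA i.1
            rw [hc] at h
            exact Option.isSome_iff_exists.mp h.symm
          have hgd : dA.getD i.1 "" = v := PySem.Dict.getD_of_get?_eq_some dA "" hv
          have hdBv : dB.get? i.1 = some v := by rw [← hg]; exact hv
          rw [PySem.Dict.setdefault_of_contains f i.2 hfct]
          by_cases hne : i.2 = v
          · have hAstep : stepA (exA, enA, dA) i = (exA, enA, dA) := by
              simp [stepA, hc, hgd, hne]
            have hBcond : ((dB.get? i.1 == some "exit") && (i.2 == "enter")) = false := by
              by_cases h2 : i.2 = "exit" <;> simp [hdBv, ← hne, h2]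
            have hBstep : stepB (dB, PySem.Set.ofList enA) i
                = (dB.insert i.1 i.2, PySem.Set.ofList enA) := by
              simp [stepB, hBcond]
            rw [hAstep, hBstep]
            apply ih _ _ _ _ _ hk _ hex
            intro k
            rw [PySem.Dict.get?_insert]
            split_ifs with hkk
            · rw [hkk, hv, hne]
            · exact hg k
          · have hAstep : stepA (exA, enA, dA) i
                = (exA, (if (i.2 == "enter") && (v == "exit") then enA ++ [i.1] else enA),
                   dA.insert i.1 i.2) := by
              simp [stepA, hc, hgd, hne]
            have hBstep : stepB (dB, PySem.Set.ofList enA) i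
                = (dB.insert i.1 i.2,
                   if (i.2 == "enter") && (v == "exit")
                   then PySem.Set.add (PySem.Set.ofList enA) i.1 else PySem.Set.ofList enA) := by
              simp [stepB, hdBv, Bool.and_comm]
            rw [hAstep, hBstep]
            have hset : (if (i.2 == "enter") && (v == "exit")
                then PySem.Set.add (PySem.Set.ofList enA) i.1 else PySem.Set.ofList enA)
                = PySem.Set.ofList (if (i.2 == "enter") && (v == "exit")
                    then enA ++ [i.1] else enA) := by
              cases hcnd : ((i.2 == "enter") && (v == "exit")) <;>
                simp [ofList_append_singleton]
            rw [hset]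
            apply ih
            · rw [PySem.Dict.keys_insert_of_contains dA i.2 hc]; exact hk
            · intro k
              rw [PySem.Dict.get?_insert, PySem.Dict.get?_insert]
              split_ifs with hkk
              · rfl
              · exact hg k
            · exact hex

-- ===== VERDICT (by name: the statement is the Claim_ definition above) =====
theorem inproperty_action_spec : Claim_equal_inproperty_action := by
  intro bs _
  unfold Spec_inproperty_action inproperty_action inproperty_action_alt
  obtain ⟨h1, h2⟩ := main_inv bs [] [] PySem.Dict.empty PySem.Dict.empty PySem.Dict.empty
    rfl (fun _ => rfl) rfl
  simp only []
  rw [foldIf_eq, h1, h2]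
  rfl
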